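-- pv_equiv track=rewrite | github.com/arieshsieh0402/LeetCode-Practice | 2262_total_appeal_of_a_string.py | appeal_sum_expansion
-- ===== SOURCE A (Python) =====
-- def appeal_sum_expansion(s: str) -> int:
--     result = 0
--     for index, char in enumerate(s):
--         left = index - 1
--         while left >= 0 and s[left] != char:
--             left -= 1
--
--         left_length = index - left
--         result += left_length * (len(s) - index)
--
--     return result
-- ===== SOURCE B (Python) =====
-- def appeal_sum_expansion(s: str) -> int:
--     n = len(s)
--     last = {}
--     result = 0
--     for i, c in enumerate(s):
--         result += (i - last.get(c, -1)) * (n - i)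
--         last[c] = i
--     return result
-- ===== Notes on version B (the rewrite author's own statement) =====
-- stated objective: faster
-- what changed: Replaced the per-index backward while-scan for the previous equal character with a single pass maintaining a last-occurrence dictionary per character.
import Mathlib
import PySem

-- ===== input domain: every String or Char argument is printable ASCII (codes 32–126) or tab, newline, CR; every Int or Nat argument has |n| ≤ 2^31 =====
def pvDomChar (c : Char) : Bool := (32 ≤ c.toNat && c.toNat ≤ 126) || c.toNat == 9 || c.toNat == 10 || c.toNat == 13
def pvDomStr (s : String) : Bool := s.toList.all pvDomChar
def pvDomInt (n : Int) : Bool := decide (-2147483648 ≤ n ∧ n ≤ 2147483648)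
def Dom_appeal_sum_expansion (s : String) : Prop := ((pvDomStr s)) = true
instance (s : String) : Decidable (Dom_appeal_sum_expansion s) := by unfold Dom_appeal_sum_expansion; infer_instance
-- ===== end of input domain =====

-- B replaces A's O(n^2) backward while-scan per index by one pass with a last-occurrence dictionary (objective: faster, asymptotic).

-- ===== PORT A =====
-- the 'while left >= 0 and s[left] != char' loop; the argument is left+1 (so 0 means left = -1)
def pvWhileA (l : List Char) (c : Char) : Nat → Int
  | 0 => -1
  | k+1 => if PySem.List.pyGet? l (k : Int) ≠ some c then pvWhileA l c k else (k : Int)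

def appeal_sum_expansion (s : String) : Int :=
  let l := s.toList
  (PySem.List.enumerate l 0).foldl
    (fun result p =>
      let left := pvWhileA l p.2 p.1.toNat
      result + (p.1 - left) * ((l.length : Int) - p.1)) 0

-- ===== PORT B =====
def appeal_sum_expansion_alt (s : String) : Int :=
  let l := s.toList
  let n : Int := l.length
  ((PySem.List.enumerate l 0).foldl
    (fun (acc : Int × PySem.Dict Char Int) p =>
      (acc.1 + (p.1 - acc.2.getD p.2 (-1)) * (n - p.1), acc.2.insert p.2 p.1))
    (0, PySem.Dict.empty)).1

-- ===== PRECONDITION & SPEC =====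
def Spec_appeal_sum_expansion (s : String) (out : Int) : Prop := out = appeal_sum_expansion_alt s
instance (s : String) (out : Int) : Decidable (Spec_appeal_sum_expansion s out) := by unfold Spec_appeal_sum_expansion; infer_instance

-- ===== CLAIM (what is proved, stated in full; the proofs are below) =====
def Claim_equal_appeal_sum_expansion : Prop := ∀ (s : String), Dom_appeal_sum_expansion s → Spec_appeal_sum_expansion s (appeal_sum_expansion s)

-- ===== LEMMAS AND PROOFS =====

theorem pvWhileA_succ (l : List Char) (c : Char) (k : Nat) (hk : k < l.length) :
    pvWhileA l c (k+1) = if l[k] ≠ c then pvWhileA l c k else (k : Int) := by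
  simp [pvWhileA, PySem.List.pyGet?_natCast, List.getElem?_eq_getElem hk]

theorem pv_aux (l : List Char) (k : Nat) (hk : k ≤ l.length) (r : Int) (d : PySem.Dict Char Int)
    (hd : ∀ c, d.getD c (-1) = pvWhileA l c k) :
    (PySem.List.enumerate (l.drop k) (k : Int)).foldl
      (fun result p =>
        let left := pvWhileA l p.2 p.1.toNat
        result + (p.1 - left) * ((l.length : Int) - p.1)) r
    = ((PySem.List.enumerate (l.drop k) (k : Int)).foldl
        (fun (acc : Int × PySem.Dict Char Int) p =>
          (acc.1 + (p.1 - acc.2.getD p.2 (-1)) * ((l.length : Int) - p.1), acc.2.insert p.2 p.1))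
        (r, d)).1 := by
  by_cases h : k = l.length
  · subst h
    simp
  · have hk' : k < l.length := lt_of_le_of_ne hk h
    have hdrop : l.drop k = l[k] :: l.drop (k+1) := List.drop_eq_getElem_cons hk'
    rw [hdrop, PySem.List.enumerate_cons, List.foldl_cons, List.foldl_cons]
    have hcast : (k : Int) + 1 = ((k+1 : Nat) : Int) := by push_cast; ring
    rw [hcast]
    have hfirst : (k : Int).toNat = k := Int.toNat_natCast k
    simp only [hfirst, hd]
    exact pv_aux l (k+1) hk' (r + ((k : Int) - pvWhileA l l[k] k) * ((l.length : Int) - (k : Int)))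
      (d.insert l[k] (k : Int))
      (by
        intro c
        rw [pvWhileA_succ l c k hk', PySem.Dict.getD_insert]
        by_cases hc : c = l[k]
        · simp [hc]
        · simp [hc, hd, Ne.symm hc])
termination_by l.length - k

-- ===== VERDICT (by name: the statement is the Claim_ definition above) =====
theorem appeal_sum_expansion_spec : Claim_equal_appeal_sum_expansion := by
  intro s _
  unfold Spec_appeal_sum_expansion appeal_sum_expansion appeal_sum_expansion_alt
  have h := pv_aux s.toList 0 (Nat.zero_le _) 0 PySem.Dict.empty
    (fun c => by simp [pvWhileA, PySem.Dict.getD_empty])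
  simpa using h
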